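-- pv_equiv track=rewrite | github.com/momosamir007-hash/Dama-offline | vision/detector.py | _class_to_tile
-- ===== SOURCE A (Python) =====
-- from typing import List, Tuple, Optional
--
-- def _class_to_tile(
--
--     class_idx: int
-- ) -> Tuple[int, int]:
--     """
--     تحويل رقم الفئة من YOLO لأرقام الحجر
--     الترتيب: 0|0, 1|0, 1|1, 2|0, 2|1, 2|2, ...
--     """
--     idx = 0
--     for i in range(7):
--         for j in range(i + 1):
--             if idx == class_idx:
--                 return (i, j)
--             idx += 1
--     return (0, 0)
-- ===== SOURCE B (Python) =====
-- from typing import Tuple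
--
--
-- def _class_to_tile(
--     class_idx: int
-- ) -> Tuple[int, int]:
--     if 0 <= class_idx < 28:
--         r = class_idx
--         for i in range(7):
--             if r <= i:
--                 return (i, r)
--             r -= i + 1
--     return (0, 0)
-- ===== Notes on version B (the rewrite author's own statement) =====
-- stated objective: simpler
-- what changed: Replaces the nested 7x(i+1) scan carrying a running class counter with a direct single-pass triangular decomposition: repeatedly subtract row sizes from class_idx until the remainder fits the row, giving (row, remainder); out-of-range indices fall straight to (0, 0).
import Mathlib
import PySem

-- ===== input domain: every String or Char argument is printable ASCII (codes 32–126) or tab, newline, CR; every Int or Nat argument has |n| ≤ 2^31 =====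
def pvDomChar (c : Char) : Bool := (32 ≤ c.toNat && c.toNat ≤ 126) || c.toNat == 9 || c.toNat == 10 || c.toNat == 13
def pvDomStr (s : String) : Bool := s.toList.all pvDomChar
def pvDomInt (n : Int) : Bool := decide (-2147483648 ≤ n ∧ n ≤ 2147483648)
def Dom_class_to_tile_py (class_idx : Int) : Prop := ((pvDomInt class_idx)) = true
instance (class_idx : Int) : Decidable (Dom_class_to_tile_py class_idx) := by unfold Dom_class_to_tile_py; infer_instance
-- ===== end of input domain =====

-- B replaces A's nested counting scan by a single subtraction pass over the 7 rows (simpler, same result).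

-- ===== PORT A =====
-- inner-loop body: state is (idx, early-return value); once some, it is threaded unchanged
def aStep (class_idx i : Int) (st : Int × Option (Int × Int)) (j : Int) : Int × Option (Int × Int) :=
  match st with
  | (idx, some p) => (idx, some p)
  | (idx, none) => if idx == class_idx then (idx, some (i, j)) else (idx + 1, none)

-- 'for j in range(i + 1): …'
def aInner (class_idx i : Int) (st : Int × Option (Int × Int)) : Int × Option (Int × Int) :=
  (PySem.List.pyRange 0 (i + 1) 1).foldl (aStep class_idx i) st

def class_to_tile_py (class_idx : Int) : Int × Int :=
  let st := (PySem.List.pyRange 0 7 1).foldl (fun st i => aInner class_idx i st) ((0 : Int), (none : Option (Int × Int)))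
  match st.2 with
  | some p => p
  | none => (0, 0)

-- ===== PORT B =====
-- 'for i in range(7): if r <= i: return (i, r); r -= i + 1' with trailing fallback (0, 0)
def altGo (rows : List Int) (r : Int) : Int × Int :=
  match rows with
  | [] => (0, 0)
  | i :: rest => if r ≤ i then (i, r) else altGo rest (r - (i + 1))

def class_to_tile_py_alt (class_idx : Int) : Int × Int :=
  if 0 ≤ class_idx ∧ class_idx < 28 then altGo (PySem.List.pyRange 0 7 1) class_idx
  else (0, 0)

-- ===== PRECONDITION & SPEC =====
def Spec_class_to_tile_py (class_idx : Int) (out : Int × Int) : Prop := out = class_to_tile_py_alt class_idx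
instance (class_idx : Int) (out : Int × Int) : Decidable (Spec_class_to_tile_py class_idx out) := by unfold Spec_class_to_tile_py; infer_instance

-- ===== CLAIM (what is proved, stated in full; the proofs are below) =====
def Claim_equal_class_to_tile_py : Prop := ∀ (class_idx : Int), Dom_class_to_tile_py class_idx → Spec_class_to_tile_py class_idx (class_to_tile_py class_idx)

-- ===== LEMMAS AND PROOFS =====

-- inner loop with a counter that never hits class_idx just advances the counter
theorem aInner_skip (c i idx : Int) (l : List Int)
    (h : ∀ t : Nat, t < l.length → idx + t ≠ c) :
    l.foldl (aStep c i) (idx, none) = (idx + l.length, none) := by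
  induction l generalizing idx with
  | nil => simp
  | cons j rest ih =>
      have h0 : (idx == c) = false := by
        have := h 0 (by simp)
        simpa using this
      have hrec : ∀ t : Nat, t < rest.length → (idx + 1) + t ≠ c := by
        intro t ht
        have := h (t + 1) (by simpa using Nat.succ_lt_succ ht)
        push_cast at this ⊢
        omega
      simp only [List.foldl_cons, aStep, h0, Bool.false_eq_true, if_false]
      rw [ih _ hrec]
      have : idx + 1 + (rest.length : Int) = idx + ((j :: rest).length : Int) := by
        simp only [List.length_cons]; push_cast; omega
      rw [this]

theorem class_to_tile_py_out (c : Int) (h : c < 0 ∨ 28 ≤ c) :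
    class_to_tile_py c = (0, 0) := by
  have range7 : PySem.List.pyRange 0 7 1 = [0, 1, 2, 3, 4, 5, 6] := by
    rw [PySem.List.pyRange_one]
    simp [List.range_succ]
  have hi : ∀ (i idx : Int), (c < idx ∨ idx + (i + 1) ≤ c) → 0 ≤ i →
      aInner c i (idx, none) = (idx + (i + 1), none) := by
    intro i idx hno hi0
    unfold aInner
    have hlen : ((PySem.List.pyRange 0 (i + 1) 1).length : Int) = i + 1 := by
      rw [PySem.List.length_pyRange_one]
      omega
    rw [aInner_skip c i idx _ ?_, hlen]
    intro t ht
    have : (t : Int) < i + 1 := by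
      rw [← hlen]; exact_mod_cast ht
    omega
  have e0 : aInner c 0 (0, none) = (1, none) := by rw [hi 0 0 (by omega) (by omega)]; norm_num
  have e1 : aInner c 1 (1, none) = (3, none) := by rw [hi 1 1 (by omega) (by omega)]; norm_num
  have e2 : aInner c 2 (3, none) = (6, none) := by rw [hi 2 3 (by omega) (by omega)]; norm_num
  have e3 : aInner c 3 (6, none) = (10, none) := by rw [hi 3 6 (by omega) (by omega)]; norm_num
  have e4 : aInner c 4 (10, none) = (15, none) := by rw [hi 4 10 (by omega) (by omega)]; norm_num
  have e5 : aInner c 5 (15, none) = (21, none) := by rw [hi 5 15 (by omega) (by omega)]; norm_num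
  have e6 : aInner c 6 (21, none) = (28, none) := by rw [hi 6 21 (by omega) (by omega)]; norm_num
  unfold class_to_tile_py
  rw [range7]
  simp only [List.foldl_cons, List.foldl_nil]
  rw [e0, e1, e2, e3, e4, e5, e6]

theorem class_to_tile_py_spec_aux (c : Int) : class_to_tile_py c = class_to_tile_py_alt c := by
  by_cases h : 0 ≤ c ∧ c < 28
  · obtain ⟨h1, h2⟩ := h
    interval_cases c <;> decide
  · rw [class_to_tile_py_out c (by omega)]
    simp only [class_to_tile_py_alt, if_neg h]

-- ===== VERDICT (by name: the statement is the Claim_ definition above) =====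
theorem class_to_tile_py_spec : Claim_equal_class_to_tile_py := by
  intro c _
  exact class_to_tile_py_spec_aux c
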